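-- pv_equiv track=rewrite | github.com/jaycherd/TeamCreator | team_calcs/calcs.py | teamset_is_valid
-- ===== SOURCE A (Python) =====
-- from typing import List,Set,Tuple,Dict
-- from collections import Counter
--
-- def teamset_is_valid(teamset: Tuple[Tuple[str,...],...],grp3: List[str]) -> bool:
--     mem_occs = Counter()
--     #look for repeats in teamset
--     for team in teamset:
--         for mem in team:
--             mem_occs[mem] += 1
--             if mem_occs[mem] == 2:
--                 return False #repeat invalid
--     #next lets check that grp3 has at most one member in the set
--     grp3_set = {mem for mem in grp3}
--     grp3_mems = 0
--     for team in teamset: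
--         #count grp3 mems += length of the current team intersected by grp3_set
--         #bcs of way we generated teams before, there will be at most one grp3 member
--         #on a team, so this is really checking if any grp3 mems if yes then grp3 count
--         #in the current set is incremented by one
--         grp3_mems += len(set(team).intersection(grp3_set))
--         if grp3_mems > 1:
--             return False
--     return True
-- ===== SOURCE B (Python) =====
-- def teamset_is_valid(teamset, grp3):
--     # sort-based: adjacent-duplicate scan, then a two-pointer merge over sorted lists
--     all_mems = sorted(m for team in teamset for m in team)
--     for a, b in zip(all_mems, all_mems[1:]):
--         if a == b:
--             return False
--     g3 = sorted(set(grp3))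
--     i = j = common = 0
--     while i < len(all_mems) and j < len(g3):
--         if all_mems[i] < g3[j]:
--             i += 1
--         elif g3[j] < all_mems[i]:
--             j += 1
--         else:
--             common += 1
--             i += 1
--             j += 1
--     return common <= 1
-- ===== Notes on version B (the rewrite author's own statement) =====
-- stated objective: alternative
-- what changed: Replaces A's hash-based passes (a running Counter with early exit, then per-team set intersections with a running total) by a sort-based algorithm: sort the flattened members and scan adjacent pairs for a duplicate, then count common members of the two sorted lists with a two-pointer merge.
import Mathlib
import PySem

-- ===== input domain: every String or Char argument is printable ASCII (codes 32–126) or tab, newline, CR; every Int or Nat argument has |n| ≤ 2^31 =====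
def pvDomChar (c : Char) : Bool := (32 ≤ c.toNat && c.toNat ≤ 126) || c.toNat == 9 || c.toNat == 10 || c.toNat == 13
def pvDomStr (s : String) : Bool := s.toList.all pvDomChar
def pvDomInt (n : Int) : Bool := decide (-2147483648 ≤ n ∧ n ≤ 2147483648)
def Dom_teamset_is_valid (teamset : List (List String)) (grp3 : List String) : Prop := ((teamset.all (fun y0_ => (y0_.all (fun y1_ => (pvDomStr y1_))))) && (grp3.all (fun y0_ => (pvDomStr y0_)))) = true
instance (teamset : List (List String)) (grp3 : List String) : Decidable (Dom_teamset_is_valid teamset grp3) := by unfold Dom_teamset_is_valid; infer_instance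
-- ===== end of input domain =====

-- B replaces A's hash-based passes (running Counter with early exit, per-team set
-- intersections) by a sort-based algorithm: adjacent-duplicate scan on the sorted
-- flattened members, then a two-pointer merge counting common members; objective: alternative.

-- ===== PORT A =====
-- inner loop 'for mem in team: mem_occs[mem] += 1; if mem_occs[mem] == 2: return False'
def pvA_dup1 (team : List String) (cnt : PySem.Dict String Int) : Option (PySem.Dict String Int) :=
  match team with
  | [] => some cnt
  | m :: rest =>
    let cnt' := cnt.modify m 0 (· + 1)
    if cnt'.getD m 0 == 2 then none else pvA_dup1 rest cnt'

-- outer loop 'for team in teamset: …' (none = early `return False`)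
def pvA_dupLoop (teamset : List (List String)) (cnt : PySem.Dict String Int) : Option (PySem.Dict String Int) :=
  match teamset with
  | [] => some cnt
  | t :: ts =>
    match pvA_dup1 t cnt with
    | none => none
    | some c => pvA_dupLoop ts c

-- 'for team in teamset: grp3_mems += len(set(team).intersection(grp3_set)); if grp3_mems > 1: return False'
def pvA_grp3Loop (teamset : List (List String)) (g3 : PySem.Set String) (acc : Int) : Bool :=
  match teamset with
  | [] => true
  | t :: ts =>
    let acc' := acc + ((PySem.Set.inter (PySem.Set.ofList t) g3).length : Int)
    if acc' > 1 then false else pvA_grp3Loop ts g3 acc'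

def teamset_is_valid (teamset : List (List String)) (grp3 : List String) : Bool :=
  match pvA_dupLoop teamset PySem.Dict.empty with
  | none => false
  | some _ => pvA_grp3Loop teamset (PySem.Set.ofList grp3) 0

-- ===== PORT B =====
-- 'for a, b in zip(all_mems, all_mems[1:]): if a == b: return False'
def pvB_hasAdjDup (xs : List String) : Bool :=
  match xs with
  | a :: b :: rest => if a == b then true else pvB_hasAdjDup (b :: rest)
  | _ => false

-- the two-pointer merge loop counting common elements of the two sorted lists
def pvB_merge (xs ys : List String) (common : Int) : Int :=
  match xs, ys with
  | x :: xs', y :: ys' =>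
    if x < y then pvB_merge xs' (y :: ys') common
    else if y < x then pvB_merge (x :: xs') ys' common
    else pvB_merge xs' ys' (common + 1)
  | _, _ => common
termination_by xs.length + ys.length
decreasing_by all_goals (simp; try omega)

def teamset_is_valid_alt (teamset : List (List String)) (grp3 : List String) : Bool :=
  let all_mems := PySem.List.sorted (teamset.flatMap (fun team => team)) (fun x => x) false
  if pvB_hasAdjDup all_mems then false
  else
    let g3 := PySem.List.sorted (PySem.Set.ofList grp3) (fun x => x) false
    decide (pvB_merge all_mems g3 0 ≤ 1)

-- ===== PRECONDITION & SPEC =====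
def Spec_teamset_is_valid (teamset : List (List String)) (grp3 : List String) (out : Bool) : Prop := out = teamset_is_valid_alt teamset grp3
instance (teamset : List (List String)) (grp3 : List String) (out : Bool) : Decidable (Spec_teamset_is_valid teamset grp3 out) := by unfold Spec_teamset_is_valid; infer_instance

-- ===== CLAIM (what is proved, stated in full; the proofs are below) =====
def Claim_equal_teamset_is_valid : Prop := ∀ (teamset : List (List String)) (grp3 : List String), Dom_teamset_is_valid teamset grp3 → Spec_teamset_is_valid teamset grp3 (teamset_is_valid teamset grp3)

-- ===== LEMMAS AND PROOFS =====

-- splitting the flattened scan of A's first loop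
lemma pvA_dup1_append (xs ys : List String) (cnt : PySem.Dict String Int) :
    pvA_dup1 (xs ++ ys) cnt = (pvA_dup1 xs cnt).bind (fun c => pvA_dup1 ys c) := by
  induction xs generalizing cnt with
  | nil => simp [pvA_dup1]
  | cons m rest ih =>
    simp only [List.cons_append, pvA_dup1]
    split <;> simp [ih]

lemma pvA_dupLoop_eq_flatten (teamset : List (List String)) (cnt : PySem.Dict String Int) :
    pvA_dupLoop teamset cnt = pvA_dup1 teamset.flatten cnt := by
  induction teamset generalizing cnt with
  | nil => simp [pvA_dupLoop, pvA_dup1]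
  | cons t ts ih =>
    simp only [pvA_dupLoop, List.flatten_cons, pvA_dup1_append]
    cases pvA_dup1 t cnt with
    | none => rfl
    | some c => simp [ih]

-- the Counter scan returns None exactly on a duplicated flattened list
lemma pvA_dup1_none_iff (xs : List String) (seen : List String) (cnt : PySem.Dict String Int)
    (hnd : seen.Nodup) (hinv : ∀ m, cnt.getD m 0 = (seen.count m : Int)) :
    (pvA_dup1 xs cnt = none ↔ ¬ (seen ++ xs).Nodup) := by
  induction xs generalizing seen cnt with
  | nil => simp [pvA_dup1, hnd]
  | cons m rest ih =>
    simp only [pvA_dup1]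
    have hm : (cnt.modify m 0 (· + 1)).getD m 0 = (seen.count m : Int) + 1 := by
      rw [PySem.Dict.getD_modify_self, hinv]
    by_cases hmem : m ∈ seen
    · have h1 : seen.count m = 1 := List.count_eq_one_of_mem hnd hmem
      have : ((cnt.modify m 0 (· + 1)).getD m 0 == 2) = true := by
        simp [hm, h1]
      rw [this]
      simp only [if_true]
      have hnot : ¬ (seen ++ m :: rest).Nodup := fun h =>
        (List.disjoint_of_nodup_append h hmem) List.mem_cons_self
      simp [hnot]
    · have h0 : seen.count m = 0 := List.count_eq_zero.mpr hmem
      have : ((cnt.modify m 0 (· + 1)).getD m 0 == 2) = false := by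
        simp [hm, h0]
      rw [this]
      simp only [Bool.false_eq_true, if_false]
      have hnd' : (seen ++ [m]).Nodup :=
        hnd.append (List.nodup_singleton m)
          (by intro a ha hb; simp at hb; exact hmem (hb ▸ ha))
      have hinv' : ∀ m', (cnt.modify m 0 (· + 1)).getD m' 0 = ((seen ++ [m]).count m' : Int) := by
        intro m'
        rw [PySem.Dict.getD_modify]
        by_cases hem : m' = m
        · subst hem; simp [hinv, List.count_append]
        · simp [hem, hinv, List.count_append, Ne.symm hem]
      have := ih (seen ++ [m]) _ hnd' hinv'
      rw [this]
      simp [List.append_assoc]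

-- on a Nodup team, the intersection size is a membership count
lemma inter_len_eq_countP (t : List String) (g3 : PySem.Set String) (ht : t.Nodup) :
    (PySem.Set.inter (PySem.Set.ofList t) g3).length = t.countP (fun mem => PySem.Set.contains g3 mem) := by
  rw [PySem.Set.ofList_eq_self_of_nodup t ht]
  simp [PySem.Set.inter, List.countP_eq_length_filter]

-- A's early-exit running total equals the aggregate comparison
lemma pvA_grp3Loop_eq (teamset : List (List String)) (g3 : PySem.Set String) (acc : Int)
    (hacc : acc ≤ 1) :
    pvA_grp3Loop teamset g3 acc =
      decide (acc + ((teamset.map (fun t => ((PySem.Set.inter (PySem.Set.ofList t) g3).length : Int))).sum) ≤ 1) := by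
  induction teamset generalizing acc with
  | nil => simp [pvA_grp3Loop, hacc]
  | cons t ts ih =>
    simp only [pvA_grp3Loop, List.map_cons, List.sum_cons]
    have hnn : (0 : Int) ≤ ((ts.map (fun t => ((PySem.Set.inter (PySem.Set.ofList t) g3).length : Int))).sum) := by
      apply List.sum_nonneg
      intro x hx
      obtain ⟨u, _, rfl⟩ := List.mem_map.mp hx
      positivity
    by_cases hgt : acc + ((PySem.Set.inter (PySem.Set.ofList t) g3).length : Int) > 1
    · rw [if_pos hgt]
      have hfalse : ¬ (acc + (((PySem.Set.inter (PySem.Set.ofList t) g3).length : Int) + (ts.map (fun t => ((PySem.Set.inter (PySem.Set.ofList t) g3).length : Int))).sum) ≤ 1) := by omega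
      exact (decide_eq_false hfalse).symm
    · rw [if_neg hgt, ih _ (by omega)]
      simp only [decide_eq_decide]
      omega

-- B's adjacent scan on a ≤-sorted list detects exactly the duplicated lists
lemma pvB_hasAdjDup_iff : ∀ (xs : List String), xs.Pairwise (· ≤ ·) →
    (pvB_hasAdjDup xs = false ↔ xs.Nodup) := by
  intro xs
  induction xs with
  | nil => intro _; simp [pvB_hasAdjDup]
  | cons a t ih =>
    intro h
    cases t with
    | nil => simp [pvB_hasAdjDup]
    | cons b r =>
      by_cases hab : a = b
      · subst hab
        simp [pvB_hasAdjDup]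
      · have hle : a ≤ b := (List.pairwise_cons.mp h).1 b List.mem_cons_self
        have hbr : (b :: r).Pairwise (· ≤ ·) := (List.pairwise_cons.mp h).2
        simp only [pvB_hasAdjDup, beq_iff_eq, hab, if_false]
        rw [ih hbr]
        constructor
        · intro hnd
          refine hnd.cons ?_
          intro hmem
          rcases List.mem_cons.mp hmem with h1 | h2
          · exact hab h1
          · have : b ≤ a := (List.pairwise_cons.mp hbr).1 a h2
            exact hab (le_antisymm hle this)
        · intro hnd; exact hnd.of_cons

-- B's two-pointer merge on strictly sorted lists counts the common elements
lemma pvB_merge_eq : ∀ (xs : List String), xs.Pairwise (· < ·) →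
    ∀ (ys : List String), ys.Pairwise (· < ·) → ∀ (c : Int),
    pvB_merge xs ys c = c + (xs.countP (fun m => decide (m ∈ ys)) : Int) := by
  intro xs
  induction xs with
  | nil =>
    intro _ ys _ c
    cases ys <;> simp [pvB_merge]
  | cons x xs' ihx =>
    intro hx ys hy c
    obtain ⟨hxlt, hx'⟩ := List.pairwise_cons.mp hx
    induction ys generalizing c with
    | nil => simp [pvB_merge]
    | cons y ys' ihy =>
      obtain ⟨hylt, hy'⟩ := List.pairwise_cons.mp hy
      simp only [pvB_merge]
      by_cases hxy : x < y
      · rw [if_pos hxy, ihx hx' _ hy c]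
        have hxnot : ¬ (x ∈ y :: ys') := by
          intro hm
          rcases List.mem_cons.mp hm with h1 | h2
          · exact absurd h1 (ne_of_lt hxy)
          · exact absurd rfl (ne_of_lt (lt_trans hxy (hylt x h2)))
        have hx1 : x ≠ y := ne_of_lt hxy
        have hx2 : x ∉ ys' := fun h => absurd rfl (ne_of_lt (lt_trans hxy (hylt x h)))
        have : (x :: xs').countP (fun m => decide (m ∈ y :: ys')) = xs'.countP (fun m => decide (m ∈ y :: ys')) := by
          simp [hx1, hx2]
        rw [this]
      · rw [if_neg hxy]
        by_cases hyx : y < x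
        · rw [if_pos hyx, ihy hy' c]
          congr 2
          apply List.countP_congr
          intro m hm
          have hym : y < m := by
            rcases List.mem_cons.mp hm with h1 | h2
            · exact h1 ▸ hyx
            · exact lt_trans hyx (hxlt m h2)
          simp [List.mem_cons, (ne_of_lt hym).symm]
        · rw [if_neg hyx]
          have hxyeq : x = y := le_antisymm (not_lt.mp hyx) (not_lt.mp hxy)
          rw [ihx hx' _ hy' (c + 1)]
          have hxs' : xs'.countP (fun m => decide (m ∈ y :: ys')) = xs'.countP (fun m => decide (m ∈ ys')) := by
            apply List.countP_congr
            intro m hm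
            have : y < m := hxyeq ▸ hxlt m hm
            simp [List.mem_cons, (ne_of_lt this).symm]
          have : (x :: xs').countP (fun m => decide (m ∈ y :: ys')) = xs'.countP (fun m => decide (m ∈ ys')) + 1 := by
            rw [List.countP_cons, hxs']
            simp [hxyeq]
          rw [this]
          push_cast
          ring

-- ===== VERDICT (by name: the statement is the Claim_ definition above) =====
theorem teamset_is_valid_spec : Claim_equal_teamset_is_valid := by
  intro teamset grp3 _
  unfold Spec_teamset_is_valid teamset_is_valid teamset_is_valid_alt
  simp only [List.flatMap_id']
  have hdup := pvA_dup1_none_iff teamset.flatten [] PySem.Dict.empty List.nodup_nil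
    (by intro m; simp [PySem.Dict.getD_empty])
  simp only [List.nil_append] at hdup
  rw [pvA_dupLoop_eq_flatten]
  have hperm : (PySem.List.sorted teamset.flatten (fun x => x) false).Perm teamset.flatten :=
    PySem.List.sorted_perm _ _ _
  have hple : (PySem.List.sorted teamset.flatten (fun x => x) false).Pairwise (· ≤ ·) := by
    have := PySem.List.sorted_pairwise (xs := teamset.flatten) (key := fun x => x)
    exact this
  have hiff := pvB_hasAdjDup_iff _ hple
  by_cases hnd : teamset.flatten.Nodup
  · have hsome : pvA_dup1 teamset.flatten PySem.Dict.empty ≠ none := fun hc => (hdup.mp hc) hnd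
    cases hc : pvA_dup1 teamset.flatten PySem.Dict.empty with
    | none => exact absurd hc hsome
    | some c =>
      have hndS : (PySem.List.sorted teamset.flatten (fun x => x) false).Nodup := hperm.nodup_iff.mpr hnd
      rw [if_neg (by simp [hiff.mpr hndS])]
      rw [pvA_grp3Loop_eq _ _ _ (by omega)]
      -- strictly sorted lists for the merge lemma
      have hplt : (PySem.List.sorted teamset.flatten (fun x => x) false).Pairwise (· < ·) :=
        (hple.and hndS).imp (fun h => lt_of_le_of_ne h.1 h.2)
      have hg3lt : (PySem.List.sorted (PySem.Set.ofList grp3) (fun x => x) false).Pairwise (· < ·) :=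
        PySem.List.sorted_ofList_pairwise_lt grp3
      rw [pvB_merge_eq _ hplt _ hg3lt 0]
      have hteams : ∀ t ∈ teamset, t.Nodup := (List.nodup_flatten.mp hnd).1
      have hmapeq : (teamset.map (fun t => ((PySem.Set.inter (PySem.Set.ofList t) (PySem.Set.ofList grp3)).length : Int)))
          = teamset.map (fun t => ((t.countP (fun mem => PySem.Set.contains (PySem.Set.ofList grp3) mem) : Int))) := by
        apply List.map_congr_left
        intro t ht
        rw [inter_len_eq_countP t _ (hteams t ht)]
      rw [hmapeq]
      have hsum : (teamset.map (fun t => ((t.countP (fun mem => PySem.Set.contains (PySem.Set.ofList grp3) mem) : Int)))).sum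
          = ((teamset.flatten.countP (fun mem => PySem.Set.contains (PySem.Set.ofList grp3) mem) : Int)) := by
        rw [List.countP_flatten]
        push_cast
        simp [List.map_map, Function.comp_def]
      rw [hsum]
      -- B's count over the sorted list equals A's count over the flattened list
      have hcount : (PySem.List.sorted teamset.flatten (fun x => x) false).countP
            (fun m => decide (m ∈ PySem.List.sorted (PySem.Set.ofList grp3) (fun x => x) false))
          = teamset.flatten.countP (fun mem => PySem.Set.contains (PySem.Set.ofList grp3) mem) := by
        rw [hperm.countP_eq]
        apply List.countP_congr
        intro m _
        simp [PySem.List.mem_sorted]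
      rw [hcount]
  · have hnone : pvA_dup1 teamset.flatten PySem.Dict.empty = none := hdup.mpr hnd
    rw [hnone]
    have hndS : ¬ (PySem.List.sorted teamset.flatten (fun x => x) false).Nodup := by
      rw [hperm.nodup_iff]; exact hnd
    have hne : pvB_hasAdjDup (PySem.List.sorted teamset.flatten (fun x => x) false) ≠ false :=
      fun h => hndS (hiff.mp h)
    rw [if_pos (Bool.ne_false_iff.mp hne)]
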